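-- pv_equiv track=rewrite | github.com/chameleon-hpc/samoa-chameleon | scripts/DG/Sage/modules/meta.py | getDGIndeces
-- ===== SOURCE A (Python) =====
-- def getDGIndeces(order,direction):
--     indeces=[]
--     if direction == "l":
--         return list(range(0,order + 1))
--     if direction == "m":
--         idx=order
--         for i in range(0,order + 1):
--             indeces.append(idx)
--             idx = idx + order - i
--     if direction == "r":
--         idx=0
--         for i in range(0,order + 1):
--             indeces.append(idx)
--             idx = idx + order + 1 - i
--     return indeces
-- ===== SOURCE B (Python) =====
-- def getDGIndeces(order, direction):
--     if direction == "l":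
--         return [k for k in range(order + 1)]
--     if direction == "m":
--         return [order + k * order - k * (k - 1) // 2 for k in range(order + 1)]
--     if direction == "r":
--         return [k * (order + 1) - k * (k - 1) // 2 for k in range(order + 1)]
--     return []
-- ===== Notes on version B (the rewrite author's own statement) =====
-- stated objective: alternative
-- what changed: Replaced the running-sum accumulator loops by list comprehensions computing each index directly from a closed-form triangular-number formula.
import Mathlib
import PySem

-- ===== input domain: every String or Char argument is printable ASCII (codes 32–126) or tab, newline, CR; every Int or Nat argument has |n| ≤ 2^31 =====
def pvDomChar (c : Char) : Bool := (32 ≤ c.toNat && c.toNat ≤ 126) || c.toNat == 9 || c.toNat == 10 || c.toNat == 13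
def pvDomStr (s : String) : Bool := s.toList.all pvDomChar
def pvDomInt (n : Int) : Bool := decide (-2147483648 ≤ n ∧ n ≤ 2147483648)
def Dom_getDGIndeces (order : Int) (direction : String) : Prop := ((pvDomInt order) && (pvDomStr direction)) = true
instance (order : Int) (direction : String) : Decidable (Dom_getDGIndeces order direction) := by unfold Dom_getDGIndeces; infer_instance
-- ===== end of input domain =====

-- B replaces A's running-sum accumulator loops by closed-form triangular-number formulas (alternative decomposition, same cost).


-- ===== PORT A =====
-- literal port: 'm' and 'r' loops carry (indeces, idx) and append idx each step
def getDGIndeces (order : Int) (direction : String) : List Int :=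
  let indeces : List Int := []
  if direction == "l" then
    PySem.List.pyRange 0 (order + 1) 1
  else
    let indeces :=
      if direction == "m" then
        ((PySem.List.pyRange 0 (order + 1) 1).foldl
          (fun (s : List Int × Int) i => (s.1 ++ [s.2], s.2 + order - i)) (indeces, order)).1
      else indeces
    let indeces :=
      if direction == "r" then
        ((PySem.List.pyRange 0 (order + 1) 1).foldl
          (fun (s : List Int × Int) i => (s.1 ++ [s.2], s.2 + order + 1 - i)) (indeces, 0)).1
      else indeces
    indeces

-- ===== PORT B =====
def getDGIndeces_alt (order : Int) (direction : String) : List Int :=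
  if direction == "l" then
    (PySem.List.pyRange 0 (order + 1) 1).map (fun k => k)
  else if direction == "m" then
    (PySem.List.pyRange 0 (order + 1) 1).map
      (fun k => order + k * order - PySem.Int.floordiv (k * (k - 1)) 2)
  else if direction == "r" then
    (PySem.List.pyRange 0 (order + 1) 1).map
      (fun k => k * (order + 1) - PySem.Int.floordiv (k * (k - 1)) 2)
  else []

-- ===== PRECONDITION & SPEC =====
def Spec_getDGIndeces (order : Int) (direction : String) (out : List Int) : Prop := out = getDGIndeces_alt order direction
instance (order : Int) (direction : String) (out : List Int) : Decidable (Spec_getDGIndeces order direction out) := by unfold Spec_getDGIndeces; infer_instance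

-- ===== CLAIM (what is proved, stated in full; the proofs are below) =====
def Claim_equal_getDGIndeces : Prop := ∀ (order : Int) (direction : String), Dom_getDGIndeces order direction → Spec_getDGIndeces order direction (getDGIndeces order direction)

-- ===== LEMMAS AND PROOFS =====

lemma tri_step (n : Nat) :
    PySem.Int.floordiv (((n : Int) + 1) * ((n : Int) + 1 - 1)) 2
      = PySem.Int.floordiv ((n : Int) * ((n : Int) - 1)) 2 + n := by
  rw [PySem.Int.floordiv_eq_ediv_of_pos (by norm_num),
      PySem.Int.floordiv_eq_ediv_of_pos (by norm_num)]
  have h : ((n : Int) + 1) * ((n : Int) + 1 - 1) = (n : Int) * ((n : Int) - 1) + 2 * n := by ring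
  rw [h]
  omega

lemma mloop (order : Int) (n : Nat) :
    (PySem.List.pyRange 0 (n : Int) 1).foldl
        (fun (s : List Int × Int) i => (s.1 ++ [s.2], s.2 + order - i)) ([], order)
      = ((PySem.List.pyRange 0 (n : Int) 1).map
           (fun k => order + k * order - PySem.Int.floordiv (k * (k - 1)) 2),
         order + (n : Int) * order - PySem.Int.floordiv ((n : Int) * ((n : Int) - 1)) 2) := by
  induction n with
  | zero =>
      simp [PySem.List.pyRange_one_eq_nil (le_refl (0 : Int)), PySem.Int.floordiv]
  | succ n ih =>
      have hc : ((n : Int) + 1) = ((n + 1 : Nat) : Int) := by push_cast; ring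
      rw [← hc, PySem.List.pyRange_one_succ_right (by positivity : (0 : Int) ≤ (n : Int))]
      rw [List.foldl_append, List.map_append, ih]
      simp only [List.foldl_cons, List.foldl_nil, List.map_cons, List.map_nil]
      simp only [Prod.mk.injEq]
      exact ⟨trivial, by rw [tri_step]; ring⟩

lemma rloop (order : Int) (n : Nat) :
    (PySem.List.pyRange 0 (n : Int) 1).foldl
        (fun (s : List Int × Int) i => (s.1 ++ [s.2], s.2 + order + 1 - i)) ([], 0)
      = ((PySem.List.pyRange 0 (n : Int) 1).map
           (fun k => k * (order + 1) - PySem.Int.floordiv (k * (k - 1)) 2),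
         (n : Int) * (order + 1) - PySem.Int.floordiv ((n : Int) * ((n : Int) - 1)) 2) := by
  induction n with
  | zero =>
      simp [PySem.List.pyRange_one_eq_nil (le_refl (0 : Int)), PySem.Int.floordiv]
  | succ n ih =>
      have hc : ((n : Int) + 1) = ((n + 1 : Nat) : Int) := by push_cast; ring
      rw [← hc, PySem.List.pyRange_one_succ_right (by positivity : (0 : Int) ≤ (n : Int))]
      rw [List.foldl_append, List.map_append, ih]
      simp only [List.foldl_cons, List.foldl_nil, List.map_cons, List.map_nil]
      simp only [Prod.mk.injEq]
      exact ⟨trivial, by rw [tri_step]; ring⟩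

lemma pyRange_nat_or_nil (b : Int) :
    (∃ n : Nat, b = (n : Int)) ∨ PySem.List.pyRange 0 b 1 = [] := by
  rcases le_or_gt b 0 with h | h
  · exact Or.inr (PySem.List.pyRange_one_eq_nil h)
  · exact Or.inl ⟨b.toNat, by omega⟩

-- ===== VERDICT (by name: the statement is the Claim_ definition above) =====
theorem getDGIndeces_spec : Claim_equal_getDGIndeces := by
  intro order direction _
  unfold Spec_getDGIndeces getDGIndeces getDGIndeces_alt
  by_cases hl : direction == "l"
  · simp [hl, List.map_id']
  · simp only [hl, Bool.false_eq_true, if_false]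
    rcases pyRange_nat_or_nil (order + 1) with ⟨n, hn⟩ | hnil
    · by_cases hm : direction == "m"
      · have hr : (direction == "r") = false := by
          have : direction = "m" := by simpa using hm
          simp [this]
        simp only [hm, if_true, hr, Bool.false_eq_true, if_false]
        rw [show PySem.List.pyRange 0 (order + 1) 1 = PySem.List.pyRange 0 ((n : Int)) 1 from by rw [hn]]
        rw [mloop order n]
      · by_cases hr : direction == "r"
        · simp only [hm, Bool.false_eq_true, if_false, hr, if_true]
          rw [show PySem.List.pyRange 0 (order + 1) 1 = PySem.List.pyRange 0 ((n : Int)) 1 from by rw [hn]]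
          rw [rloop order n]
        · simp [hm, hr]
    · simp [hnil]
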